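-- pv_equiv track=rewrite | github.com/ann02-creater/chipschips | src/single-player-ttt/sources_1/ip/blk_mem_gen_0/circle_image_generator.py | generate_circle_coe
-- ===== SOURCE A (Python) =====
-- def generate_circle_coe(width=213, height=160, radius=50):
--     """
--     Generate COE file data for a circle image
--     """
--     # Calculate center of the image
--     center_x = width // 2
--     center_y = height // 2
--
--     # Generate header
--     lines = []
--     lines.append("memory_initialization_radix=16;")
--     lines.append("memory_initialization_vector=")
--
--     # Generate pixel data
--     for y in range(height):
--         for x in range(width):
--             # Calculate distance from center
--             dx = x - center_x
--             dy = y - center_y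
--             distance_squared = dx * dx + dy * dy
--
--             # Check if pixel is inside circle
--             if distance_squared <= radius * radius:
--                 # Inside circle - white pixel (FFF)
--                 pixel = "FFF"
--             else:
--                 # Outside circle - black/transparent (000)
--                 pixel = "000"
--
--             # Add pixel to output
--             if y == height - 1 and x == width - 1:
--                 # Last pixel - no comma
--                 lines.append(pixel + ";")
--             else:
--                 lines.append(pixel + ",")
--
--     return lines
-- ===== SOURCE B (Python) =====
-- def _isqrt(n):
--     # largest s with s*s <= n, by binary search (n >= 0)
--     lo, hi = 0, n
--     while lo < hi:
--         mid = (lo + hi + 1) // 2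
--         if mid * mid <= n:
--             lo = mid
--         else:
--             hi = mid - 1
--     return lo
--
--
-- def generate_circle_coe(width=213, height=160, radius=50):
--     """
--     Generate COE file data for a circle image
--     """
--     if width <= 0 or height <= 0:
--         return ["memory_initialization_radix=16;", "memory_initialization_vector="]
--     cx = width // 2
--     cy = height // 2
--     rr = radius * radius
--     pixels = []
--     for y in range(height):
--         m = rr - (y - cy) * (y - cy)
--         if m < 0:
--             row = ["000"] * width
--         else:
--             s = _isqrt(m)
--             row = ["FFF" if cx - s <= x <= cx + s else "000" for x in range(width)]
--         pixels.extend(row)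
--     lines = ["memory_initialization_radix=16;", "memory_initialization_vector="]
--     lines += [p + "," for p in pixels]
--     if pixels:
--         lines[-1] = pixels[-1] + ";"
--     return lines
-- ===== Notes on version B (the rewrite author's own statement) =====
-- stated objective: alternative
-- what changed: Replaces the per-pixel distance test and in-loop last-pixel branching with a per-row analytic interval fill (integer sqrt of radius^2 - dy^2 via binary search) that builds the flat pixel list first, then appends all commas and patches only the final separator.
import Mathlib
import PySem

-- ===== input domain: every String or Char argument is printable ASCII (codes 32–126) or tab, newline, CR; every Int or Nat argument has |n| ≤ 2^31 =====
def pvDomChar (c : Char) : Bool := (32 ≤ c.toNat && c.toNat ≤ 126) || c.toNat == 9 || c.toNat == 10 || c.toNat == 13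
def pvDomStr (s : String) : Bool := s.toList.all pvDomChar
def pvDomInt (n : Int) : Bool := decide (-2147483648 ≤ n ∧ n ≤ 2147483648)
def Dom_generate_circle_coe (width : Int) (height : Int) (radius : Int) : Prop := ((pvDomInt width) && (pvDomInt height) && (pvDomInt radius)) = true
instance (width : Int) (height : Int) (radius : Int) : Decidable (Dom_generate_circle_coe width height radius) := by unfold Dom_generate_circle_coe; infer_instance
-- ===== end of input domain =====

-- B replaces the per-pixel distance test and in-loop last-pixel branch with a per-row
-- interval fill (binary-search integer sqrt) followed by a single last-separator patch
-- (alternative decomposition, same asymptotic cost).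


-- ===== PORT A =====
def generate_circle_coe (width : Int) (height : Int) (radius : Int) : List String :=
  let center_x := PySem.Int.floordiv width 2
  let center_y := PySem.Int.floordiv height 2
  let lines : List String := ["memory_initialization_radix=16;", "memory_initialization_vector="]
  (PySem.List.pyRange 0 height 1).foldl (fun lines y =>
    (PySem.List.pyRange 0 width 1).foldl (fun lines x =>
      let dx := x - center_x
      let dy := y - center_y
      let distance_squared := dx * dx + dy * dy
      let pixel := if distance_squared ≤ radius * radius then "FFF" else "000"
      if y = height - 1 ∧ x = width - 1 then lines ++ [pixel ++ ";"]
      else lines ++ [pixel ++ ","]) lines) lines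

-- ===== PORT B =====
-- binary-search integer square root (Source B's _isqrt, transliterated; the while loop is
-- run on a fuel of (hi - lo).toNat steps, enough since the interval shrinks each step)
def pvIsqrtLoop (fuel : Nat) (n lo hi : Int) : Int :=
  match fuel with
  | 0 => lo
  | fuel + 1 =>
    if lo < hi then
      let mid := PySem.Int.floordiv (lo + hi + 1) 2
      if mid * mid ≤ n then pvIsqrtLoop fuel n mid hi else pvIsqrtLoop fuel n lo (mid - 1)
    else lo

def pvIsqrt (n : Int) : Int := pvIsqrtLoop (n - 0).toNat n 0 n

def generate_circle_coe_alt (width : Int) (height : Int) (radius : Int) : List String :=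
  if width ≤ 0 ∨ height ≤ 0 then
    ["memory_initialization_radix=16;", "memory_initialization_vector="]
  else
  let cx := PySem.Int.floordiv width 2
  let cy := PySem.Int.floordiv height 2
  let rr := radius * radius
  let pixels := (PySem.List.pyRange 0 height 1).foldl (fun pixels y =>
    let m := rr - (y - cy) * (y - cy)
    let row := if m < 0 then List.replicate width.toNat "000"
      else
        let s := pvIsqrt m
        (PySem.List.pyRange 0 width 1).map (fun x =>
          if cx - s ≤ x ∧ x ≤ cx + s then "FFF" else "000")
    pixels ++ row) []
  let lines := ["memory_initialization_radix=16;", "memory_initialization_vector="]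
      ++ pixels.map (fun p => p ++ ",")
  if pixels.isEmpty then lines
  else lines.dropLast ++ [pixels.getLastD "" ++ ";"]

-- ===== PRECONDITION & SPEC =====
def Spec_generate_circle_coe (width : Int) (height : Int) (radius : Int) (out : List String) : Prop := out = generate_circle_coe_alt width height radius
instance (width : Int) (height : Int) (radius : Int) (out : List String) : Decidable (Spec_generate_circle_coe width height radius out) := by unfold Spec_generate_circle_coe; infer_instance

-- ===== CLAIM (what is proved, stated in full; the proofs are below) =====
def Claim_equal_generate_circle_coe : Prop := ∀ (width : Int) (height : Int) (radius : Int), Dom_generate_circle_coe width height radius → Spec_generate_circle_coe width height radius (generate_circle_coe width height radius)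

-- ===== LEMMAS AND PROOFS =====

-- the color of the pixel at (x, y), shared characterisation of both ports
def pvCell (width height radius y x : Int) : String :=
  if (x - PySem.Int.floordiv width 2) * (x - PySem.Int.floordiv width 2)
      + (y - PySem.Int.floordiv height 2) * (y - PySem.Int.floordiv height 2)
      ≤ radius * radius then "FFF" else "000"

def pvHdr : List String := ["memory_initialization_radix=16;", "memory_initialization_vector="]

-- pvIsqrtLoop keeps the invariant "lo is a candidate, hi bounds all candidates"
theorem pvIsqrtLoop_spec (n : Int) : ∀ (N : Nat) (lo hi : Int), (hi - lo).toNat ≤ N →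
    0 ≤ lo → lo * lo ≤ n → (∀ k : Int, 0 ≤ k → k * k ≤ n → k ≤ hi) →
    0 ≤ pvIsqrtLoop N n lo hi ∧ pvIsqrtLoop N n lo hi * pvIsqrtLoop N n lo hi ≤ n ∧
      ∀ k : Int, 0 ≤ k → k * k ≤ n → k ≤ pvIsqrtLoop N n lo hi := by
  intro N
  induction N with
  | zero =>
      intro lo hi hN h0 hlo hhi
      rw [pvIsqrtLoop]
      exact ⟨h0, hlo, fun k hk hkn => le_trans (hhi k hk hkn) (by omega)⟩
  | succ N ih =>
      intro lo hi hN h0 hlo hhi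
      rw [pvIsqrtLoop]
      by_cases h : lo < hi
      · simp only [if_pos h]
        have hq : PySem.Int.floordiv (lo + hi + 1) 2 = (lo + hi + 1) / 2 :=
          PySem.Int.floordiv_eq_ediv_of_pos (by norm_num)
        split_ifs with hc
        · exact ih _ _ (by omega) (by omega) hc hhi
        · refine ih _ _ (by omega) h0 hlo ?_
          intro k hk hkn
          by_contra hcon
          have hkm : PySem.Int.floordiv (lo + hi + 1) 2 ≤ k := by omega
          have hm0 : 0 ≤ PySem.Int.floordiv (lo + hi + 1) 2 := by omega
          nlinarith
      · simp only [if_neg h]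
        exact ⟨h0, hlo, fun k hk hkn => le_trans (hhi k hk hkn) (by omega)⟩

theorem pvIsqrt_spec (n : Int) (hn : 0 ≤ n) :
    0 ≤ pvIsqrt n ∧ pvIsqrt n * pvIsqrt n ≤ n ∧
      ∀ k : Int, 0 ≤ k → k * k ≤ n → k ≤ pvIsqrt n := by
  refine pvIsqrtLoop_spec n ((n - 0).toNat) 0 n le_rfl le_rfl (by simpa) ?_
  intro k hk hkn
  rcases eq_or_lt_of_le hk with h | h
  · omega
  · nlinarith

-- the per-pixel test equals the per-row interval test
theorem interval_iff (m dx : Int) (hm : 0 ≤ m) :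
    dx * dx ≤ m ↔ (-(pvIsqrt m) ≤ dx ∧ dx ≤ pvIsqrt m) := by
  obtain ⟨hs0, hs1, hs2⟩ := pvIsqrt_spec m hm
  constructor
  · intro hle
    rcases le_or_gt 0 dx with h | h
    · exact ⟨by linarith [hs2 dx h hle], hs2 dx h hle⟩
    · have := hs2 (-dx) (by omega) (by nlinarith)
      exact ⟨by omega, by omega⟩
  · intro ⟨h1, h2⟩
    nlinarith

-- A's nested-append loop body, flattened to a map
theorem foldl_if_append {α : Type} (l : List α) (acc : List String)
    (p : α → Prop) [DecidablePred p] (f g : α → String) :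
    l.foldl (fun acc x => if p x then acc ++ [f x] else acc ++ [g x]) acc
      = acc ++ l.map (fun x => if p x then f x else g x) := by
  induction l generalizing acc with
  | nil => simp
  | cons a t ih => simp only [List.foldl_cons, List.map_cons]; split_ifs <;> simp [ih]

theorem A_eq (width height radius : Int) :
    generate_circle_coe width height radius =
      pvHdr ++ (PySem.List.pyRange 0 height 1).flatMap (fun y =>
        (PySem.List.pyRange 0 width 1).map (fun x =>
          if y = height - 1 ∧ x = width - 1 then pvCell width height radius y x ++ ";"
          else pvCell width height radius y x ++ ",")) := by
  unfold generate_circle_coe pvHdr pvCell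
  simp only [foldl_if_append, PySem.List.foldl_append_eq_flatMap]

theorem row_eq (width height radius y : Int) :
    (if radius * radius - (y - PySem.Int.floordiv height 2) * (y - PySem.Int.floordiv height 2) < 0
     then List.replicate width.toNat "000"
     else (PySem.List.pyRange 0 width 1).map (fun x =>
        if PySem.Int.floordiv width 2
              - pvIsqrt (radius * radius - (y - PySem.Int.floordiv height 2) * (y - PySem.Int.floordiv height 2)) ≤ x
            ∧ x ≤ PySem.Int.floordiv width 2
              + pvIsqrt (radius * radius - (y - PySem.Int.floordiv height 2) * (y - PySem.Int.floordiv height 2))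
        then "FFF" else "000"))
    = (PySem.List.pyRange 0 width 1).map (pvCell width height radius y) := by
  set cx := PySem.Int.floordiv width 2 with hcx
  set cy := PySem.Int.floordiv height 2 with hcy
  set m := radius * radius - (y - cy) * (y - cy) with hm
  by_cases h : m < 0
  · rw [if_pos h]
    have hall : ∀ x : Int, pvCell width height radius y x = "000" := by
      intro x
      unfold pvCell
      rw [if_neg]
      rw [← hcx, ← hcy]
      nlinarith [mul_self_nonneg (x - cx)]
    calc List.replicate width.toNat "000"
        = List.replicate (PySem.List.pyRange 0 width 1).length "000" := by
          rw [PySem.List.length_pyRange_one]; norm_num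
      _ = (PySem.List.pyRange 0 width 1).map (fun _ => "000") := by
          rw [List.map_const']
      _ = (PySem.List.pyRange 0 width 1).map (pvCell width height radius y) := by
          exact List.map_congr_left (fun x _ => (hall x).symm)
  · rw [if_neg h]
    apply List.map_congr_left
    intro x _
    unfold pvCell
    rw [← hcx, ← hcy]
    have hiff := interval_iff m (x - cx) (by omega)
    have : ((x - cx) * (x - cx) + (y - cy) * (y - cy) ≤ radius * radius)
        ↔ (cx - pvIsqrt m ≤ x ∧ x ≤ cx + pvIsqrt m) := by
      rw [show ((x - cx) * (x - cx) + (y - cy) * (y - cy) ≤ radius * radius) ↔ ((x - cx) * (x - cx) ≤ m) from by omega]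
      rw [hiff]
      omega
    simp only [this]

theorem B_eq (width height radius : Int) :
    generate_circle_coe_alt width height radius =
      (let P := (PySem.List.pyRange 0 height 1).flatMap (fun y =>
          (PySem.List.pyRange 0 width 1).map (pvCell width height radius y));
       if P.isEmpty then pvHdr ++ P.map (fun p => p ++ ",")
       else (pvHdr ++ P.map (fun p => p ++ ",")).dropLast ++ [P.getLastD "" ++ ";"]) := by
  unfold generate_circle_coe_alt pvHdr
  by_cases hg : width ≤ 0 ∨ height ≤ 0
  · rw [if_pos hg]
    have hP : (PySem.List.pyRange 0 height 1).flatMap (fun y =>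
        (PySem.List.pyRange 0 width 1).map (pvCell width height radius y)) = [] := by
      rcases hg with hg | hg
      · have hx : PySem.List.pyRange 0 width 1 = [] := PySem.List.pyRange_one_eq_nil (by omega)
        simp [hx]
      · have hy : PySem.List.pyRange 0 height 1 = [] := PySem.List.pyRange_one_eq_nil (by omega)
        simp [hy]
    simp [hP]
  · rw [if_neg hg]
    simp only [PySem.List.foldl_append_eq_flatMap, List.nil_append, row_eq]

-- ===== VERDICT (by name: the statement is the Claim_ definition above) =====
theorem main_eq (width height radius : Int) :
    generate_circle_coe width height radius = generate_circle_coe_alt width height radius := by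
  rw [A_eq, B_eq]
  by_cases hh : height ≤ 0
  · have : PySem.List.pyRange 0 height 1 = [] := PySem.List.pyRange_one_eq_nil (by omega)
    simp [this]
  · by_cases hw : width ≤ 0
    · have : PySem.List.pyRange 0 width 1 = [] := PySem.List.pyRange_one_eq_nil (by omega)
      have hz : List.flatMap (fun _ => ([] : List String)) (PySem.List.pyRange 0 height 1) = [] := by
        simp
      simp [this, hz]
    · -- both dimensions positive: peel off the last row and the last column
      have hys : PySem.List.pyRange 0 height 1
          = PySem.List.pyRange 0 (height - 1) 1 ++ [height - 1] := by
        have h1 := PySem.List.pyRange_one_succ_right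
          (a := 0) (b := height - 1) (by omega : (0:Int) ≤ height - 1)
        rwa [sub_add_cancel] at h1
      have hxs : PySem.List.pyRange 0 width 1
          = PySem.List.pyRange 0 (width - 1) 1 ++ [width - 1] := by
        have h1 := PySem.List.pyRange_one_succ_right
          (a := 0) (b := width - 1) (by omega : (0:Int) ≤ width - 1)
        rwa [sub_add_cancel] at h1
      rw [hys, hxs]
      simp only [List.flatMap_append, List.map_append, List.flatMap_cons, List.flatMap_nil,
        List.map_cons, List.map_nil, List.append_nil]
      have hfront := List.flatMap_congr (l := PySem.List.pyRange 0 (height - 1) 1)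
        (f := fun y => List.map (fun x => if y = height - 1 ∧ x = width - 1
                  then pvCell width height radius y x ++ ";"
                  else pvCell width height radius y x ++ ",")
                (PySem.List.pyRange 0 (width - 1) 1)
              ++ [if y = height - 1 ∧ True then pvCell width height radius y (width - 1) ++ ";"
                  else pvCell width height radius y (width - 1) ++ ","])
        (g := fun y => List.map (fun x => pvCell width height radius y x ++ ",")
                (PySem.List.pyRange 0 (width - 1) 1)
              ++ [pvCell width height radius y (width - 1) ++ ","])
        (by intro y hy
            have hylt : y < height - 1 := (PySem.List.mem_pyRange_one.mp hy).2
            simp [show ¬(y = height - 1) from by omega])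
      rw [hfront]
      have hlast := List.map_congr_left (l := PySem.List.pyRange 0 (width - 1) 1)
        (f := fun x => if True ∧ x = width - 1
            then pvCell width height radius (height - 1) x ++ ";"
            else pvCell width height radius (height - 1) x ++ ",")
        (g := fun x => pvCell width height radius (height - 1) x ++ ",")
        (by intro x hx
            have hxlt : x < width - 1 := (PySem.List.mem_pyRange_one.mp hx).2
            simp [show ¬(x = width - 1) from by omega])
      rw [hlast]
      simp [List.map_flatMap, List.map_map, Function.comp_def, ← List.append_assoc]

theorem generate_circle_coe_spec : Claim_equal_generate_circle_coe := by
  intro width height radius _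
  unfold Spec_generate_circle_coe
  exact main_eq width height radius
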